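-- pv_equiv track=rewrite | github.com/noec764/frappe | frappe/utils/block_editor/block_editor_jinja_utils.py | split_in_parts
-- ===== SOURCE A (Python) =====
-- def split_in_parts(code: str):
-- 	if not code:
-- 		return None
--
-- 	# Reject {% %} in code
-- 	if "{%" in code or "%}" in code:
-- 		return None
--
-- 	# Strip {{ }} from code
-- 	code = code.replace("{{", "").replace("}}", "")
--
-- 	parts = []
-- 	part = ""
-- 	for c in code:
-- 		if c.isspace():
-- 			continue
-- 		elif c == "]":
-- 			part += c
-- 			parts.append(part.strip())
-- 			part = ""
-- 		elif c in ".[":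
-- 			if part:
-- 				parts.append(part.strip())
-- 			part = c if c == "[" else ""
-- 		else:
-- 			part += c
-- 	if part:
-- 		parts.append(part.strip())
-- 	return parts
-- ===== SOURCE B (Python) =====
-- def split_in_parts(code: str):
-- 	if not code:
-- 		return None
-- 	if "{%" in code or "%}" in code:
-- 		return None
-- 	code = code.replace("{{", "").replace("}}", "")
-- 	code = "".join(c for c in code if not c.isspace())
-- 	code = code.replace("[", ".[").replace("]", "].")
-- 	return [p for p in code.split(".") if p]
-- ===== Notes on version B (the rewrite author's own statement) =====
-- stated objective: simpler
-- what changed: Replaced A's stateful character-by-character accumulator loop with a pipeline: filter out whitespace, insert dot separators around brackets via str.replace, then split on the dot and drop empty tokens.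
import Mathlib
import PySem

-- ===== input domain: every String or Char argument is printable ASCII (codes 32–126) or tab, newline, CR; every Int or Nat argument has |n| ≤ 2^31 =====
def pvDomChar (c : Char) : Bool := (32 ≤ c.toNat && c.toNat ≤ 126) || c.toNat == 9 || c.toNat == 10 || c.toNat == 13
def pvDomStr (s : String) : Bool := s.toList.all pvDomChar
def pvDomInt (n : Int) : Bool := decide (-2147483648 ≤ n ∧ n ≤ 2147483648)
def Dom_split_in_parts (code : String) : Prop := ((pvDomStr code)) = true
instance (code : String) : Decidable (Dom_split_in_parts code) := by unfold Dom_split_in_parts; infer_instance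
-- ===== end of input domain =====

-- B replaces A's hand-rolled character loop by whitespace-removal + "."/"[" separator insertion + split-and-filter (objective: simpler).

-- ===== PORT A =====
-- loop body of A's `for c in code` (state = (parts, part))
def pvStepA (s : List String × List Char) (c : Char) : List String × List Char :=
  if PySem.Chars.isspace c then s
  else if c = ']' then (s.1 ++ [String.ofList (PySem.Chars.strip (s.2 ++ [c]))], [])
  else if c = '.' ∨ c = '[' then
    ((if s.2 ≠ [] then s.1 ++ [String.ofList (PySem.Chars.strip s.2)] else s.1),
     if c = '[' then [c] else [])
  else (s.1, s.2 ++ [c])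

def split_in_parts (code : String) : Option (List String) :=
  if code = "" then none
  else if PySem.Str.isIn "{%" code || PySem.Str.isIn "%}" code then none
  else
    let code2 := PySem.Str.replace (PySem.Str.replace code "{{" "") "}}" ""
    let st := code2.toList.foldl pvStepA ([], [])
    some (if st.2 ≠ [] then st.1 ++ [String.ofList (PySem.Chars.strip st.2)] else st.1)

-- ===== PORT B =====
def split_in_parts_alt (code : String) : Option (List String) :=
  if code = "" then none
  else if PySem.Str.isIn "{%" code || PySem.Str.isIn "%}" code then none
  else
    let code2 := PySem.Str.replace (PySem.Str.replace code "{{" "") "}}" ""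
    -- "".join(c for c in code if not c.isspace())
    let code3 := String.ofList (code2.toList.filter (fun c => ! PySem.Chars.isspace c))
    let code4 := PySem.Str.replace (PySem.Str.replace code3 "[" ".[") "]" "]."
    -- code4.split("."): the separator "." is non-empty, so Python's split always returns (Chars.splitOn)
    some (((PySem.Chars.splitOn code4.toList ".".toList).map String.ofList).filter (fun p => p ≠ ""))

-- ===== PRECONDITION & SPEC =====
def Spec_split_in_parts (code : String) (out : Option (List String)) : Prop := out = split_in_parts_alt code
instance (code : String) (out : Option (List String)) : Decidable (Spec_split_in_parts code out) := by unfold Spec_split_in_parts; infer_instance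

-- ===== CLAIM (what is proved, stated in full; the proofs are below) =====
def Claim_equal_split_in_parts : Prop := ∀ (code : String), Dom_split_in_parts code → Spec_split_in_parts code (split_in_parts code)

-- ===== LEMMAS AND PROOFS =====

-- per-character expansion of B's two separator-inserting replaces
def pvF (c : Char) : List Char := if c = '[' then ['.', '['] else if c = ']' then [']', '.'] else [c]

-- split on '.' as a structural recursion: (current head segment, remaining segments)
def pvSd : List Char → List Char × List (List Char)
  | [] => ([], [])
  | c :: t => let p := pvSd t; if c = '.' then ([], p.1 :: p.2) else (c :: p.1, p.2)

theorem pv_replace_single_go (a : Char) (new : List Char) :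
    ∀ (l : List Char) (fuel : Nat) (acc : List Char), l.length ≤ fuel →
      PySem.Chars.replace.go [a] new fuel l acc
        = acc.reverse ++ l.flatMap (fun c => if c = a then new else [c]) := by
  intro l
  induction l with
  | nil => intro fuel acc h; cases fuel <;> simp [PySem.Chars.replace.go]
  | cons c t ih =>
    intro fuel acc h
    cases fuel with
    | zero => simp at h
    | succ f =>
      simp only [PySem.Chars.replace.go]
      by_cases hc : c = a
      · subst hc
        have hp : List.isPrefixOf [c] (c :: t) = true := by simp [List.isPrefixOf]
        simp only [hp, if_pos]
        rw [show List.drop (List.length [c]) (c :: t) = t by simp]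
        rw [ih f (new.reverse ++ acc) (by simpa using Nat.le_of_succ_le_succ h)]
        simp
      · have hp : List.isPrefixOf [a] (c :: t) = false := by
          simp [List.isPrefixOf]; exact fun h' => (hc h'.symm).elim
        simp only [hp]
        rw [if_neg (by simp)]
        rw [ih f (c :: acc) (by simpa using Nat.le_of_succ_le_succ h)]
        simp [hc]

theorem pv_replace_single (l : List Char) (a : Char) (new : List Char) :
    PySem.Chars.replace l [a] new = l.flatMap (fun c => if c = a then new else [c]) := by
  simp only [PySem.Chars.replace, List.isEmpty_cons, Bool.false_eq_true, if_false]
  simpa using pv_replace_single_go a new l l.length [] (le_refl _)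

theorem pv_repl2 (l : List Char) :
    PySem.Chars.replace (PySem.Chars.replace l ['['] ['.', '[']) [']'] [']', '.']
      = l.flatMap pvF := by
  rw [pv_replace_single, pv_replace_single, List.flatMap_assoc]
  apply List.flatMap_congr
  intro c _
  by_cases h1 : c = '[' <;> by_cases h2 : c = ']' <;> simp [pvF, h1, h2]

theorem pv_splitOn_go :
    ∀ (l : List Char) (fuel : Nat) (cur : List Char) (acc : List (List Char)), l.length ≤ fuel →
      PySem.Chars.splitOn.go ['.'] fuel l cur acc
        = acc.reverse ++ ((cur.reverse ++ (pvSd l).1) :: (pvSd l).2) := by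
  intro l
  induction l with
  | nil => intro fuel cur acc h; cases fuel <;> simp [PySem.Chars.splitOn.go, pvSd]
  | cons c t ih =>
    intro fuel cur acc h
    cases fuel with
    | zero => simp at h
    | succ f =>
      simp only [PySem.Chars.splitOn.go]
      by_cases hc : c = '.'
      · subst hc
        have hp : List.isPrefixOf ['.'] ('.' :: t) = true := by simp [List.isPrefixOf]
        simp only [hp, if_pos]
        rw [show List.drop (List.length ['.']) ('.' :: t) = t by simp]
        rw [ih f [] (cur.reverse :: acc) (by simpa using Nat.le_of_succ_le_succ h)]
        simp [pvSd]
      · have hp : List.isPrefixOf ['.'] (c :: t) = false := by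
          simp [List.isPrefixOf]; exact fun h' => (hc h'.symm).elim
        simp only [hp]
        rw [if_neg (by simp)]
        rw [ih f (c :: cur) acc (by simpa using Nat.le_of_succ_le_succ h)]
        simp [pvSd, hc]

theorem pv_splitOn_dot (l : List Char) :
    PySem.Chars.splitOn l ['.'] = (pvSd l).1 :: (pvSd l).2 := by
  simp only [PySem.Chars.splitOn]
  simpa using pv_splitOn_go l (l.length + 1) [] [] (Nat.le_succ _)

theorem pv_sd_append_nodot (xs ys : List Char) (h : ∀ c ∈ xs, c ≠ '.') :
    pvSd (xs ++ ys) = (xs ++ (pvSd ys).1, (pvSd ys).2) := by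
  induction xs with
  | nil => simp
  | cons c t ih =>
    have hc : c ≠ '.' := h c (by simp)
    simp [pvSd, ih (fun d hd => h d (by simp [hd])), hc]

theorem pv_strip_nows (l : List Char) (h : ∀ c ∈ l, PySem.Chars.isspace c = false) :
    PySem.Chars.strip l = l := by
  have key : ∀ (m : List Char), (∀ c ∈ m, PySem.Chars.isspace c = false) →
      List.dropWhile PySem.Chars.isspace m = m := by
    intro m hm
    cases m with
    | nil => rfl
    | cons c t => simp [hm c (by simp)]
  unfold PySem.Chars.strip PySem.Chars.lstrip PySem.Chars.rstrip
  rw [key l h, key l.reverse (fun c hc => h c (List.mem_reverse.mp hc)), List.reverse_reverse]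

-- drop whitespace characters in front of A's loop: pvStepA ignores them
theorem pv_foldl_filter (l : List Char) (s : List String × List Char) :
    l.foldl pvStepA s = (l.filter (fun c => ! PySem.Chars.isspace c)).foldl pvStepA s := by
  induction l generalizing s with
  | nil => rfl
  | cons c t ih =>
    by_cases hc : PySem.Chars.isspace c
    · simp [hc, pvStepA, ih]
    · simp [hc, pvStepA, ih]

def pvFinish (st : List String × List Char) : List String :=
  if st.2 ≠ [] then st.1 ++ [String.ofList (PySem.Chars.strip st.2)] else st.1

def pvSeg (z : List Char) : List String :=
  (((pvSd z).1 :: (pvSd z).2).map String.ofList).filter (fun p => p ≠ "")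

theorem pv_ofList_ne (cs : List Char) (h : cs ≠ []) : String.ofList cs ≠ "" := by
  intro he
  apply h
  have := congrArg String.toList he
  simpa using this

-- splitting pvSeg at the first '.': the dot-free prefix becomes one (dropped iff empty) token
theorem pvSeg_dot (xs X : List Char) (h : ∀ c ∈ xs, c ≠ '.') :
    pvSeg (xs ++ '.' :: X)
      = (if xs = [] then [] else [String.ofList xs]) ++ pvSeg X := by
  unfold pvSeg
  rw [pv_sd_append_nodot xs ('.' :: X) h]
  simp only [pvSd]
  rcases hx : xs with - | ⟨d, t⟩
  · simp
  · rw [← hx]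
    have : xs ≠ [] := by rw [hx]; simp
    simp [this, List.filter_cons, pv_ofList_ne xs this]

-- core invariant: A's loop over whitespace-free input computes B's split-and-filter
theorem pv_core (m : List Char) (hm : ∀ c ∈ m, PySem.Chars.isspace c = false) :
    ∀ (parts : List String) (part : List Char),
      (∀ c ∈ part, PySem.Chars.isspace c = false ∧ c ≠ '.') →
      pvFinish (m.foldl pvStepA (parts, part)) = parts ++ pvSeg (part ++ m.flatMap pvF) := by
  induction m with
  | nil =>
    intro parts part hp
    have hsd : pvSd part = (part, []) := by
      simpa [pvSd] using pv_sd_append_nodot part [] (fun c hc => (hp c hc).2)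
    simp only [List.flatMap_nil, List.append_nil, List.foldl_nil, pvFinish, pvSeg, hsd]
    rcases part with - | ⟨c, t⟩
    · simp
    · rw [pv_strip_nows _ (fun c hc => (hp c hc).1)]
      simp
  | cons c m ih =>
    intro parts part hp
    have hm' : ∀ d ∈ m, PySem.Chars.isspace d = false := fun d hd => hm d (by simp [hd])
    have hcs : PySem.Chars.isspace c = false := hm c (by simp)
    have hnodot : ∀ d ∈ part, d ≠ '.' := fun d hd => (hp d hd).2
    simp only [List.foldl_cons, List.flatMap_cons]
    by_cases h1 : c = ']'
    · subst h1
      rw [show pvStepA (parts, part) ']'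
            = (parts ++ [String.ofList (PySem.Chars.strip (part ++ [']']))], []) by
          simp [pvStepA, hcs]]
      rw [ih hm' _ [] (by simp)]
      rw [pv_strip_nows _ (by
        intro d hd
        rcases List.mem_append.mp hd with h | h
        · exact (hp d h).1
        · simp at h; simp [h, PySem.Chars.isspace])]
      rw [show part ++ (pvF ']' ++ m.flatMap pvF) = (part ++ [']']) ++ '.' :: m.flatMap pvF by
        rw [pvF]; simp]
      rw [pvSeg_dot (part ++ [']']) (m.flatMap pvF) (by
        intro d hd
        rcases List.mem_append.mp hd with h | h
        · exact hnodot d h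
        · simp at h; simp [h])]
      have hne : (part ++ [']']) ≠ [] := by simp
      simp [hne, pvSeg]
    · by_cases h2 : c = '.'
      · subst h2
        rw [show pvStepA (parts, part) '.'
              = ((if part ≠ [] then parts ++ [String.ofList (PySem.Chars.strip part)] else parts), []) by
            simp [pvStepA, hcs]]
        rw [ih hm' _ [] (by simp)]
        rw [show part ++ (pvF '.' ++ m.flatMap pvF) = part ++ '.' :: m.flatMap pvF by
          rw [pvF]; simp]
        rw [pvSeg_dot part (m.flatMap pvF) hnodot]
        rcases part with - | ⟨d, t⟩
        · simp
        · rw [pv_strip_nows _ (fun e he => (hp e he).1)]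
          simp
      · by_cases h3 : c = '['
        · subst h3
          rw [show pvStepA (parts, part) '['
                = ((if part ≠ [] then parts ++ [String.ofList (PySem.Chars.strip part)] else parts), ['[']) by
              simp [pvStepA, hcs]]
          rw [ih hm' _ ['['] (by intro d hd; simp at hd; simp [hd]; decide)]
          rw [show part ++ (pvF '[' ++ m.flatMap pvF) = part ++ ('.' :: (['['] ++ m.flatMap pvF)) by rw [pvF]; simp]
          rw [pvSeg_dot part (['['] ++ m.flatMap pvF) hnodot]
          rcases part with - | ⟨d, t⟩
          · simp
          · rw [pv_strip_nows _ (fun e he => (hp e he).1)]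
            simp
        · rw [show pvStepA (parts, part) c = (parts, part ++ [c]) by
              simp [pvStepA, hcs, h1, h2, h3]]
          rw [ih hm' parts (part ++ [c]) (by
            intro d hd
            rcases List.mem_append.mp hd with h | h
            · exact hp d h
            · simp at h; subst h; exact ⟨hcs, h2⟩)]
          rw [show part ++ (pvF c ++ m.flatMap pvF) = (part ++ [c]) ++ m.flatMap pvF by
            simp [pvF, h1, h3]]

-- ===== VERDICT (by name: the statement is the Claim_ definition above) =====
theorem split_in_parts_spec : Claim_equal_split_in_parts := by
  intro code _
  unfold Spec_split_in_parts split_in_parts split_in_parts_alt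
  by_cases h1 : code = ""
  · simp [h1]
  · rw [if_neg h1, if_neg h1]
    by_cases h2 : (PySem.Str.isIn "{%" code || PySem.Str.isIn "%}" code) = true
    · rw [if_pos h2, if_pos h2]
    · rw [if_neg h2, if_neg h2]
      dsimp only
      apply congrArg some
      generalize (PySem.Str.replace (PySem.Str.replace code "{{" "") "}}" "").toList = l
      rw [pv_foldl_filter]
      have hfin : ∀ st : List String × List Char,
          (if st.2 ≠ [] then st.1 ++ [String.ofList (PySem.Chars.strip st.2)] else st.1) = pvFinish st :=
        fun _ => rfl
      rw [hfin]
      rw [pv_core _ (fun c hc => by simpa using (List.mem_filter.mp hc).2) [] [] (by simp)]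
      rw [PySem.Str.toList_replace, PySem.Str.toList_replace, String.toList_ofList]
      rw [show ("[" : String).toList = ['['] from rfl, show (".[" : String).toList = ['.', '['] from rfl,
          show ("]" : String).toList = [']'] from rfl, show ("]." : String).toList = [']', '.'] from rfl,
          show ("." : String).toList = ['.'] from rfl]
      rw [pv_repl2, pv_splitOn_dot]
      simp [pvSeg]
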